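-- pv_equiv track=rewrite | github.com/tripleday/PAGB | test.py | outbound
-- ===== SOURCE A (Python) =====
-- def outbound(id, tList, K, C):
--         m = 0
--         nm = 0
--         for t in tList:
--                 if (id+',out,'+t) in C:
--                         m += 1
--                         nextList = C[id+',out,'+t]
--                         if K>1:
--                                 for node in nextList:
--                                         mr, nmr = outbound(node, tList, K-1, C)
--                                         m += mr
--                                         nm += nmr
--                 else:
--                         nm += 1
--         return m, nm
-- ===== SOURCE B (Python) =====
-- def outbound(id, tList, K, C):
--     # Dynamic programming: the result only depends on the state (node, depth),
--     # so cache each state's (matched, unmatched) totals instead of re-expanding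
--     # the same state once per path through the recursion tree.
--     memo = {}
--
--     def go(i, k):
--         r = memo.get((i, k))
--         if r is not None:
--             return r
--         m = 0
--         nm = 0
--         for t in tList:
--             vs = C.get(i + ',out,' + t)
--             if vs is not None:
--                 m += 1
--                 if k > 1:
--                     for node in vs:
--                         mr, nmr = go(node, k - 1)
--                         m += mr
--                         nm += nmr
--             else:
--                 nm += 1
--         memo[(i, k)] = (m, nm)
--         return m, nm
--
--     return go(id, K)
-- ===== Notes on version B (the rewrite author's own statement) =====
-- stated objective: alternative
-- what changed: B memoizes the recursion on its state (node id, remaining depth K) in a dictionary, so each distinct state is expanded once (dynamic programming) instead of once per path as in A's plain tree recursion.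
import Mathlib
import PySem

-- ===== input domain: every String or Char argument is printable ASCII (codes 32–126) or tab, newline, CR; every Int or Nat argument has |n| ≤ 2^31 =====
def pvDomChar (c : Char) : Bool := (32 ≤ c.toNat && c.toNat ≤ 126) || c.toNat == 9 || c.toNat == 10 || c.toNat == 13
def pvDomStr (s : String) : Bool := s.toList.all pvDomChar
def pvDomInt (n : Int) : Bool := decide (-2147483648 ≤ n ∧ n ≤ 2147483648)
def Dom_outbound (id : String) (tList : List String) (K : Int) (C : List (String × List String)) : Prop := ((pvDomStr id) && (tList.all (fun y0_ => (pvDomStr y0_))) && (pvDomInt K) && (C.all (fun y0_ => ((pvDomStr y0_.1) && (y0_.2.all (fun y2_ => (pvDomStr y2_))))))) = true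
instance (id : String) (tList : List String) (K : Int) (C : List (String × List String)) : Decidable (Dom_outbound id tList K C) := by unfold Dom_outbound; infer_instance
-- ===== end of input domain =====

-- B memoizes A's pure recursion on the state (node, depth): each distinct state is
-- expanded once instead of once per path; objective: alternative (dynamic programming).

-- ===== PORT A =====
-- A's recursion decreases K by 1 and only recurses while K > 1, so its depth is bounded by
-- (K-1).toNat; that quantity is the fuel. On every call fuel = (K-1).toNat, hence in the
-- fuel = 0 arm the invariant gives K ≤ 1 and Python's `if K > 1` branch is not taken: the
-- arm is Python's body with the (unreachable) recursion branch collapsed to `m += 1`.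
def outboundFuel : Nat → String → List String → Int → List (String × List String) → Int × Int
  | 0, id, tList, _, C =>
    tList.foldl (fun (s : Int × Int) t =>
      match (PySem.Dict.ofList C).get? (id ++ ",out," ++ t) with
      | some _ => (s.1 + 1, s.2)
      | none => (s.1, s.2 + 1)) (0, 0)
  | f + 1, id, tList, K, C =>
    tList.foldl (fun (s : Int × Int) t =>
      match (PySem.Dict.ofList C).get? (id ++ ",out," ++ t) with
      | some nextList =>
        if K > 1 then
          nextList.foldl (fun (s2 : Int × Int) node =>
            let r := outboundFuel f node tList (K - 1) C
            (s2.1 + r.1, s2.2 + r.2)) (s.1 + 1, s.2)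
        else (s.1 + 1, s.2)
      | none => (s.1, s.2 + 1)) (0, 0)

def outbound (id : String) (tList : List String) (K : Int) (C : List (String × List String)) : Int × Int :=
  outboundFuel (K - 1).toNat id tList K C

-- ===== PORT B =====
-- Source B's inner `go` with the memo dict threaded through explicitly; same fuel scheme as
-- port A (fuel = (k-1).toNat on every call, so in the fuel = 0 arm k ≤ 1 and Source B's
-- `if k > 1` recursion branch is not taken). The state of the loops is the pair
-- ((m, nm), memo); memo.get((i, k)) is Dict.get? (values are never None).
def goMemo : Nat → List String → List (String × List String) → String → Int →
    PySem.Dict (String × Int) (Int × Int) → (Int × Int) × PySem.Dict (String × Int) (Int × Int)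
  | 0, tList, C, i, k, memo =>
    match memo.get? (i, k) with
    | some r => (r, memo)
    | none =>
      let res := tList.foldl (fun (s : Int × Int) t =>
        match (PySem.Dict.ofList C).get? (i ++ ",out," ++ t) with
        | some _ => (s.1 + 1, s.2)
        | none => (s.1, s.2 + 1)) (0, 0)
      (res, memo.insert (i, k) res)
  | f + 1, tList, C, i, k, memo =>
    match memo.get? (i, k) with
    | some r => (r, memo)
    | none =>
      let st := tList.foldl
        (fun (s : (Int × Int) × PySem.Dict (String × Int) (Int × Int)) t =>
          match (PySem.Dict.ofList C).get? (i ++ ",out," ++ t) with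
          | some nextList =>
            if k > 1 then
              nextList.foldl (fun (s2 : (Int × Int) × PySem.Dict (String × Int) (Int × Int)) node =>
                let r := goMemo f tList C node (k - 1) s2.2
                ((s2.1.1 + r.1.1, s2.1.2 + r.1.2), r.2)) ((s.1.1 + 1, s.1.2), s.2)
            else ((s.1.1 + 1, s.1.2), s.2)
          | none => ((s.1.1, s.1.2 + 1), s.2)) ((0, 0), memo)
      (st.1, st.2.insert (i, k) st.1)

def outbound_alt (id : String) (tList : List String) (K : Int) (C : List (String × List String)) : Int × Int :=
  (goMemo (K - 1).toNat tList C id K PySem.Dict.empty).1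

-- ===== PRECONDITION & SPEC =====
def Spec_outbound (id : String) (tList : List String) (K : Int) (C : List (String × List String)) (out : Int × Int) : Prop := out = outbound_alt id tList K C
instance (id : String) (tList : List String) (K : Int) (C : List (String × List String)) (out : Int × Int) : Decidable (Spec_outbound id tList K C out) := by unfold Spec_outbound; infer_instance

-- ===== CLAIM (what is proved, stated in full; the proofs are below) =====
def Claim_equal_outbound : Prop := ∀ (id : String) (tList : List String) (K : Int) (C : List (String × List String)), Dom_outbound id tList K C → Spec_outbound id tList K C (outbound id tList K C)

-- ===== LEMMAS AND PROOFS =====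

-- the value A computes at node i and remaining depth k (fuel on the invariant fuel = (k-1).toNat)
def pvG (tList : List String) (C : List (String × List String)) (k : Int) (i : String) : Int × Int :=
  outboundFuel (k - 1).toNat i tList k C

-- a memo is correct when every entry holds the value A computes for that state
def MemoOK (tList : List String) (C : List (String × List String))
    (memo : PySem.Dict (String × Int) (Int × Int)) : Prop :=
  ∀ (i : String) (k : Int) (r : Int × Int), memo.get? (i, k) = some r → r = pvG tList C k i

lemma memoOK_insert {tList : List String} {C : List (String × List String)}
    {memo : PySem.Dict (String × Int) (Int × Int)} {i : String} {k : Int}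
    (h : MemoOK tList C memo) :
    MemoOK tList C (memo.insert (i, k) (pvG tList C k i)) := by
  intro i' k' r hr
  rw [PySem.Dict.get?_insert] at hr
  by_cases he : ((i', k') : String × Int) = (i, k)
  · rw [if_pos he] at hr
    cases he
    cases hr
    rfl
  · rw [if_neg he] at hr
    exact h i' k' r hr

lemma goMemo_correct (tList : List String) (C : List (String × List String)) :
    ∀ (fuel : Nat) (i : String) (k : Int)
      (memo : PySem.Dict (String × Int) (Int × Int)),
      fuel = (k - 1).toNat → MemoOK tList C memo →
      (goMemo fuel tList C i k memo).1 = pvG tList C k i ∧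
        MemoOK tList C (goMemo fuel tList C i k memo).2 := by
  intro fuel
  induction fuel with
  | zero =>
    intro i k memo hfuel hok
    simp only [goMemo]
    cases hm : memo.get? (i, k) with
    | some r => exact ⟨hok i k r hm, hok⟩
    | none =>
      dsimp only
      have hbase : (tList.foldl (fun (s : Int × Int) t =>
          match (PySem.Dict.ofList C).get? (i ++ ",out," ++ t) with
          | some _ => (s.1 + 1, s.2)
          | none => (s.1, s.2 + 1)) (0, 0)) = pvG tList C k i := by
        have h0 : (k - 1).toNat = 0 := by omega
        simp only [pvG, h0, outboundFuel]
      exact ⟨hbase, hbase ▸ memoOK_insert hok⟩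
  | succ f ih =>
    intro i k memo hfuel hok
    have hk : 2 ≤ k := by omega
    have hf : f = (k - 1 - 1).toNat := by omega
    simp only [goMemo]
    cases hm : memo.get? (i, k) with
    | some r => exact ⟨hok i k r hm, hok⟩
    | none =>
      dsimp only
      -- the fold over tList tracks A's fold in its first component and keeps MemoOK
      have hfold : ∀ (l : List String) (s : (Int × Int) × PySem.Dict (String × Int) (Int × Int)),
          MemoOK tList C s.2 →
          (l.foldl (fun (s : (Int × Int) × PySem.Dict (String × Int) (Int × Int)) t =>
            match (PySem.Dict.ofList C).get? (i ++ ",out," ++ t) with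
            | some nextList =>
              if k > 1 then
                nextList.foldl (fun (s2 : (Int × Int) × PySem.Dict (String × Int) (Int × Int)) node =>
                  let r := goMemo f tList C node (k - 1) s2.2
                  ((s2.1.1 + r.1.1, s2.1.2 + r.1.2), r.2)) ((s.1.1 + 1, s.1.2), s.2)
              else ((s.1.1 + 1, s.1.2), s.2)
            | none => ((s.1.1, s.1.2 + 1), s.2)) s).1
            = (l.foldl (fun (a : Int × Int) t =>
                match (PySem.Dict.ofList C).get? (i ++ ",out," ++ t) with
                | some nextList =>
                  if k > 1 then
                    nextList.foldl (fun (a2 : Int × Int) node =>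
                      let r := outboundFuel f node tList (k - 1) C
                      (a2.1 + r.1, a2.2 + r.2)) (a.1 + 1, a.2)
                  else (a.1 + 1, a.2)
                | none => (a.1, a.2 + 1)) s.1) ∧
          MemoOK tList C (l.foldl (fun (s : (Int × Int) × PySem.Dict (String × Int) (Int × Int)) t =>
            match (PySem.Dict.ofList C).get? (i ++ ",out," ++ t) with
            | some nextList =>
              if k > 1 then
                nextList.foldl (fun (s2 : (Int × Int) × PySem.Dict (String × Int) (Int × Int)) node =>
                  let r := goMemo f tList C node (k - 1) s2.2
                  ((s2.1.1 + r.1.1, s2.1.2 + r.1.2), r.2)) ((s.1.1 + 1, s.1.2), s.2)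
              else ((s.1.1 + 1, s.1.2), s.2)
            | none => ((s.1.1, s.1.2 + 1), s.2)) s).2 := by
        intro l
        induction l with
        | nil => intro s hs; exact ⟨rfl, hs⟩
        | cons t l ihl =>
          intro s hs
          simp only [List.foldl_cons]
          cases hg : (PySem.Dict.ofList C).get? (i ++ ",out," ++ t) with
          | none =>
            dsimp only
            exact ihl _ hs
          | some nl =>
            dsimp only
            rw [if_pos (by omega : k > 1), if_pos (by omega : k > 1)]
            -- the inner fold over nl tracks A's inner fold and keeps MemoOK
            have hinner : ∀ (l2 : List String)
                (s2 : (Int × Int) × PySem.Dict (String × Int) (Int × Int)),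
                MemoOK tList C s2.2 →
                (l2.foldl (fun (s2 : (Int × Int) × PySem.Dict (String × Int) (Int × Int)) node =>
                  let r := goMemo f tList C node (k - 1) s2.2
                  ((s2.1.1 + r.1.1, s2.1.2 + r.1.2), r.2)) s2).1
                  = (l2.foldl (fun (a2 : Int × Int) node =>
                      let r := outboundFuel f node tList (k - 1) C
                      (a2.1 + r.1, a2.2 + r.2)) s2.1) ∧
                MemoOK tList C (l2.foldl
                  (fun (s2 : (Int × Int) × PySem.Dict (String × Int) (Int × Int)) node =>
                    let r := goMemo f tList C node (k - 1) s2.2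
                    ((s2.1.1 + r.1.1, s2.1.2 + r.1.2), r.2)) s2).2 := by
              intro l2
              induction l2 with
              | nil => intro s2 hs2; exact ⟨rfl, hs2⟩
              | cons node l2 ihl2 =>
                intro s2 hs2
                simp only [List.foldl_cons]
                have hrec := ih node (k - 1) s2.2 hf hs2
                have hval : (goMemo f tList C node (k - 1) s2.2).1
                    = outboundFuel f node tList (k - 1) C := by
                  rw [hrec.1]
                  simp only [pvG, ← hf]
                rw [hval]
                exact ihl2 ((s2.1.1 + (outboundFuel f node tList (k - 1) C).1,
                    s2.1.2 + (outboundFuel f node tList (k - 1) C).2),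
                    (goMemo f tList C node (k - 1) s2.2).2) hrec.2
            have hstep := hinner nl ((s.1.1 + 1, s.1.2), s.2) hs
            have hrest := ihl _ hstep.2
            exact ⟨by rw [hrest.1, hstep.1], hrest.2⟩
      have hm2 := hfold tList ((0, 0), memo) hok
      have hA : (tList.foldl (fun (s : (Int × Int) × PySem.Dict (String × Int) (Int × Int)) t =>
          match (PySem.Dict.ofList C).get? (i ++ ",out," ++ t) with
          | some nextList =>
            if k > 1 then
              nextList.foldl (fun (s2 : (Int × Int) × PySem.Dict (String × Int) (Int × Int)) node =>
                let r := goMemo f tList C node (k - 1) s2.2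
                ((s2.1.1 + r.1.1, s2.1.2 + r.1.2), r.2)) ((s.1.1 + 1, s.1.2), s.2)
            else ((s.1.1 + 1, s.1.2), s.2)
          | none => ((s.1.1, s.1.2 + 1), s.2)) ((0, 0), memo)).1 = pvG tList C k i := by
        rw [hm2.1]
        have hft : (k - 1).toNat = f + 1 := hfuel.symm
        simp only [pvG, hft, outboundFuel]
      exact ⟨hA, hA ▸ memoOK_insert hm2.2⟩

-- ===== VERDICT (by name: the statement is the Claim_ definition above) =====
theorem outbound_spec : Claim_equal_outbound := by
  intro id tList K C _hdom
  show outbound id tList K C = outbound_alt id tList K C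
  have hempty : MemoOK tList C PySem.Dict.empty := by
    intro i k r hr
    simp [PySem.Dict.get?_empty] at hr
  have h := (goMemo_correct tList C (K - 1).toNat id K PySem.Dict.empty rfl hempty).1
  simp only [outbound_alt, h, pvG, outbound]
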